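-- pv_equiv track=rewrite | github.com/kananarora1/HONEST-RL-Calibrator | data/ingestion/regenerate_zebralogic.py | _enumerate_clues
-- ===== SOURCE A (Python) =====
-- from typing import Any, Dict, Iterator, List, Optional, Tuple
--
-- def _enumerate_clues(
--     solution: Dict[int, Dict[str, str]], features: List[str]
-- ) -> List[Tuple[str, ...]]:
--     """Enumerate all clues that are *true* of the solution."""
--     n = len(solution)
--     clues: List[Tuple[str, ...]] = []
--
--     # Build reverse maps: (feat, val) → house
--     pos: Dict[Tuple[str, str], int] = {}
--     for h, attrs in solution.items():
--         for feat, val in attrs.items():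
--             pos[(feat, val)] = h
--
--     # Found_At: (feat, val) is at house h
--     for (feat, val), h in pos.items():
--         clues.append(("Found_At", feat, val, str(h)))
--
--     # Left_Of / Right_Of: (feat1, val1) is immediately left/right of (feat2, val2)
--     for (f1, v1), h1 in pos.items():
--         for (f2, v2), h2 in pos.items():
--             if f1 == f2:
--                 continue
--             if h2 == h1 + 1:
--                 clues.append(("Left_Of", f1, v1, f2, v2))
--             if h2 == h1 - 1:
--                 clues.append(("Right_Of", f1, v1, f2, v2))
--
--     # Side_By_Side: (feat1, val1) and (feat2, val2) are neighbours (|h1-h2|==1)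
--     for (f1, v1), h1 in pos.items():
--         for (f2, v2), h2 in pos.items():
--             if f1 >= f2:  # avoid duplicates
--                 continue
--             if abs(h1 - h2) == 1:
--                 clues.append(("Side_By_Side", f1, v1, f2, v2))
--
--     # Not_At: (feat, val) is NOT at house h  — only generate a few
--     # (these add information density without exploding the clue set)
--     for (feat, val), h_true in pos.items():
--         for h_wrong in range(1, n + 1):
--             if h_wrong != h_true:
--                 clues.append(("Not_At", feat, val, str(h_wrong)))
--
--     return clues
-- ===== SOURCE B (Python) =====
-- from typing import Dict, List, Tuple
--
--
-- def _enumerate_clues(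
--     solution: Dict[int, Dict[str, str]], features: List[str]
-- ) -> List[Tuple[str, ...]]:
--     """Enumerate all clues that are *true* of the solution.
--
--     Instead of scanning all attribute pairs, attributes are indexed by house;
--     each attribute then only inspects the attributes of its two neighbouring
--     houses.  Clues are emitted in attribute-enumeration order.
--     """
--     n = len(solution)
--
--     # Reverse map: (feat, val) -> house
--     pos: Dict[Tuple[str, str], int] = {}
--     for h, attrs in solution.items():
--         for feat, val in attrs.items():
--             pos[(feat, val)] = h
--
--     items = [(i, f, v, h) for i, ((f, v), h) in enumerate(pos.items())]
--
--     # Index attributes by house.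
--     by_house: Dict[int, List[Tuple[int, str, str, int]]] = {}
--     for e in items:
--         by_house.setdefault(e[3], []).append(e)
--
--     def neighbours(h: int) -> List[Tuple[int, str, str, int]]:
--         """Attributes of the two houses adjacent to h, in enumeration order."""
--         nb = by_house.get(h + 1, []) + by_house.get(h - 1, [])
--         return sorted(nb, key=lambda e: e[0])
--
--     clues: List[Tuple[str, ...]] = [
--         ("Found_At", f, v, str(h)) for (_, f, v, h) in items
--     ]
--
--     for _, f1, v1, h1 in items:
--         for _, f2, v2, h2 in neighbours(h1):
--             if f1 != f2:
--                 clues.append(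
--                     ("Left_Of", f1, v1, f2, v2)
--                     if h2 == h1 + 1
--                     else ("Right_Of", f1, v1, f2, v2)
--                 )
--
--     for _, f1, v1, h1 in items:
--         for _, f2, v2, h2 in neighbours(h1):
--             if f1 < f2:
--                 clues.append(("Side_By_Side", f1, v1, f2, v2))
--
--     clues += [
--         ("Not_At", f, v, str(hw))
--         for (_, f, v, h) in items
--         for hw in range(1, n + 1)
--         if hw != h
--     ]
--     return clues
-- ===== Notes on version B (the rewrite author's own statement) =====
-- stated objective: alternative
-- what changed: Replaced A's quadratic all-pairs scans over the (feat,val)->house map by a by-house index: each attribute only inspects the attributes of its two neighbouring houses (combined in enumeration order with a standard sorted call), so the inner scan over all attributes disappears; total time is dominated by the Theta(n^2*f) Not_At output in both versions.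
import Mathlib
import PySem

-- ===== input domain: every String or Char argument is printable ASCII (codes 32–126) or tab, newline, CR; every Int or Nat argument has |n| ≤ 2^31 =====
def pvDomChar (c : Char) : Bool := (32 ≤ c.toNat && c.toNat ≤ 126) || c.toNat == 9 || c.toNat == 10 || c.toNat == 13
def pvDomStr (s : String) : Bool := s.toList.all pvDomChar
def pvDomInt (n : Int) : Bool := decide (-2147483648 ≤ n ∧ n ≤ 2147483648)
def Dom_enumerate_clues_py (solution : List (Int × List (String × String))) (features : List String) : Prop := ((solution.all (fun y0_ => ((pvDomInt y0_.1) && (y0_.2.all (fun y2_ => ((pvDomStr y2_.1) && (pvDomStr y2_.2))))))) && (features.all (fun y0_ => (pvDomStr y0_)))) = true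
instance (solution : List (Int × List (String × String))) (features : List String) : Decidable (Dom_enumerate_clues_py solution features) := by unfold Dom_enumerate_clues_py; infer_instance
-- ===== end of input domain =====

-- B replaces A's quadratic all-pairs scans by a by-house index: each attribute only
-- inspects the attributes of its two neighbouring houses.

-- ===== PORT A =====
def enumerate_clues_py (solution : List (Int × List (String × String))) (features : List String) : List (List String) :=
  let sol := PySem.Dict.ofList solution
  let n : Int := sol.size
  -- pos: (feat, val) → house
  let pos : PySem.Dict (String × String) Int :=
    sol.items.foldl (fun d hp =>
      (PySem.Dict.ofList hp.2).items.foldl (fun d fv => d.insert fv hp.1) d) PySem.Dict.empty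
  let clues : List (List String) := []
  -- Found_At
  let clues := pos.items.foldl (fun acc p =>
      acc ++ [["Found_At", p.1.1, p.1.2, PySem.Int.toStr p.2]]) clues
  -- Left_Of / Right_Of
  let clues := pos.items.foldl (fun acc p1 =>
      pos.items.foldl (fun acc p2 =>
        if p1.1.1 == p2.1.1 then acc
        else
          let acc := if p2.2 == p1.2 + 1 then acc ++ [["Left_Of", p1.1.1, p1.1.2, p2.1.1, p2.1.2]] else acc
          if p2.2 == p1.2 - 1 then acc ++ [["Right_Of", p1.1.1, p1.1.2, p2.1.1, p2.1.2]] else acc) acc) clues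
  -- Side_By_Side
  let clues := pos.items.foldl (fun acc p1 =>
      pos.items.foldl (fun acc p2 =>
        if p2.1.1 ≤ p1.1.1 then acc
        else if (p1.2 - p2.2).natAbs == 1 then acc ++ [["Side_By_Side", p1.1.1, p1.1.2, p2.1.1, p2.1.2]] else acc) acc) clues
  -- Not_At
  let clues := pos.items.foldl (fun acc p =>
      (PySem.List.pyRange 1 (n + 1) 1).foldl (fun acc hw =>
        if hw != p.2 then acc ++ [["Not_At", p.1.1, p.1.2, PySem.Int.toStr hw]] else acc) acc) clues
  clues

-- ===== PORT B =====
def enumerate_clues_py_alt (solution : List (Int × List (String × String))) (features : List String) : List (List String) :=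
  let sol := PySem.Dict.ofList solution
  let n : Int := sol.size
  let pos : PySem.Dict (String × String) Int :=
    sol.items.foldl (fun d hp =>
      (PySem.Dict.ofList hp.2).items.foldl (fun d fv => d.insert fv hp.1) d) PySem.Dict.empty
  -- items = [(i, f, v, h) for i, ((f, v), h) in enumerate(pos.items())]
  let items : List (Int × String × String × Int) :=
    (PySem.List.enumerate pos.items).map (fun e => (e.1, e.2.1.1, e.2.1.2, e.2.2))
  -- by_house: house → its attributes (with enumeration index)
  let byHouse : PySem.Dict Int (List (Int × String × String × Int)) :=
    items.foldl (fun d e => d.modify e.2.2.2 [] (· ++ [e])) PySem.Dict.empty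
  -- neighbours(h): attributes of the two houses adjacent to h, in enumeration order
  let neighbours : Int → List (Int × String × String × Int) := fun h =>
    PySem.List.sorted (byHouse.getD (h + 1) [] ++ byHouse.getD (h - 1) []) (fun e => e.1) false
  let clues : List (List String) :=
    items.map (fun t => ["Found_At", t.2.1, t.2.2.1, PySem.Int.toStr t.2.2.2])
  -- Left_Of / Right_Of
  let clues := items.foldl (fun acc t =>
      (neighbours t.2.2.2).foldl (fun acc x =>
        if t.2.1 != x.2.1 then
          acc ++ [if x.2.2.2 == t.2.2.2 + 1 then ["Left_Of", t.2.1, t.2.2.1, x.2.1, x.2.2.1]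
                  else ["Right_Of", t.2.1, t.2.2.1, x.2.1, x.2.2.1]]
        else acc) acc) clues
  -- Side_By_Side
  let clues := items.foldl (fun acc t =>
      (neighbours t.2.2.2).foldl (fun acc x =>
        if t.2.1 < x.2.1 then acc ++ [["Side_By_Side", t.2.1, t.2.2.1, x.2.1, x.2.2.1]] else acc) acc) clues
  -- Not_At
  let clues := clues ++ items.flatMap (fun t =>
      ((PySem.List.pyRange 1 (n + 1) 1).filter (fun hw => hw != t.2.2.2)).map
        (fun hw => ["Not_At", t.2.1, t.2.2.1, PySem.Int.toStr hw]))
  clues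

-- ===== PRECONDITION & SPEC =====
def Spec_enumerate_clues_py (solution : List (Int × List (String × String))) (features : List String) (out : List (List String)) : Prop := out = enumerate_clues_py_alt solution features
instance (solution : List (Int × List (String × String))) (features : List String) (out : List (List String)) : Decidable (Spec_enumerate_clues_py solution features out) := by unfold Spec_enumerate_clues_py; infer_instance

-- ===== CLAIM (what is proved, stated in full; the proofs are below) =====
def Claim_equal_enumerate_clues_py : Prop := ∀ (solution : List (Int × List (String × String))) (features : List String), Dom_enumerate_clues_py solution features → Spec_enumerate_clues_py solution features (enumerate_clues_py solution features)

-- ===== LEMMAS AND PROOFS =====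

-- proof-side abbreviations (defeq to subterms of the ports)
def pvM (p : (String × String) × Int) : String × String × Int := (p.1.1, p.1.2, p.2)

def pvBH (l : List (Int × String × String × Int)) : PySem.Dict Int (List (Int × String × String × Int)) :=
  l.foldl (fun d e => d.modify e.2.2.2 [] (· ++ [e])) PySem.Dict.empty

-- the per-pair clue generators of the two programs
def pvGALR (p1 p2 : (String × String) × Int) : List (List String) :=
  if p1.1.1 == p2.1.1 then []
  else (if p2.2 == p1.2 + 1 then [["Left_Of", p1.1.1, p1.1.2, p2.1.1, p2.1.2]] else []) ++
       (if p2.2 == p1.2 - 1 then [["Right_Of", p1.1.1, p1.1.2, p2.1.1, p2.1.2]] else [])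

def pvGBLR (t x : String × String × Int) : List (List String) :=
  if t.1 != x.1 then
    [if x.2.2 == t.2.2 + 1 then ["Left_Of", t.1, t.2.1, x.1, x.2.1]
     else ["Right_Of", t.1, t.2.1, x.1, x.2.1]]
  else []

def pvGAS (p1 p2 : (String × String) × Int) : List (List String) :=
  if p2.1.1 ≤ p1.1.1 then []
  else if (p1.2 - p2.2).natAbs == 1 then [["Side_By_Side", p1.1.1, p1.1.2, p2.1.1, p2.1.2]] else []

def pvGBS (t x : String × String × Int) : List (List String) :=
  if t.1 < x.1 then [["Side_By_Side", t.1, t.2.1, x.1, x.2.1]] else []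

theorem pvBH_getD (l : List (Int × String × String × Int)) (c : Int) :
    (pvBH l).getD c [] = l.filter (fun e => e.2.2.2 == c) := by
  unfold pvBH
  have h : (List.foldl (fun d (e : Int × String × String × Int) => d.modify e.2.2.2 [] fun x => x ++ [e]) PySem.Dict.empty l)
      = List.foldl (fun d p => d.modify p.1 [] fun x => x ++ [p.2]) PySem.Dict.empty
          (l.map fun e => (e.2.2.2, e)) := (List.foldl_map (f := fun (e : Int × String × String × Int) => (e.2.2.2, e)) (g := fun (d : PySem.Dict Int (List (Int × String × String × Int))) p => d.modify p.1 [] fun x => x ++ [p.2])).symm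
  rw [h, PySem.Dict.getD_foldl_modify_append]
  simp [List.filter_map, Function.comp_def]

-- pushing the index through enumerate
theorem pvEnumMap (P : List ((String × String) × Int)) (s : Int) :
    (PySem.List.enumerate P s).map (fun e => (e.1, e.2.1.1, e.2.1.2, e.2.2))
      = PySem.List.enumerate (P.map pvM) s := by
  induction P generalizing s with
  | nil => rfl
  | cons x xs ih => simp [PySem.List.enumerate_cons, ih, pvM]

-- a disjoint split of one filter is a permutation of it
theorem pvPermFilter {α : Type} (l : List α) (p q : α → Bool)
    (hd : ∀ x, p x = true → q x = false) :
    (l.filter (fun x => p x || q x)).Perm (l.filter p ++ l.filter q) := by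
  induction l with
  | nil => simp
  | cons x xs ih =>
    by_cases hp : p x = true
    · have hq : q x = false := hd x hp
      simpa [hp, hq] using ih.cons x
    · by_cases hq : q x = true
      · simp only [List.filter_cons, hp, hq, Bool.false_or]
        exact (ih.cons x).trans List.perm_middle.symm
      · simp only [List.filter_cons]
        simp_all
  
-- sorting the two filtered halves back together is one filter
theorem pvSortedFilter (l : List (Int × String × String × Int))
    (p q : (Int × String × String × Int) → Bool)
    (hd : ∀ x, p x = true → q x = false)
    (hl : l.Pairwise (fun a b => a.1 < b.1)) :
    PySem.List.sorted (l.filter p ++ l.filter q) (fun e => e.1) false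
      = l.filter (fun x => p x || q x) := by
  exact PySem.List.sorted_eq_of_perm_of_pairwise_lt _ _ _
    (pvPermFilter l p q hd)
    (List.Pairwise.sublist List.filter_sublist hl)

-- flatMap over a filter
theorem pvFlatMap_filter {α β : Type} (l : List α) (p : α → Bool) (g : α → List β) :
    (l.filter p).flatMap g = l.flatMap (fun x => if p x then g x else []) := by
  induction l with
  | nil => rfl
  | cons x xs ih => by_cases h : p x <;> simp [h, ih]

-- flatMap over enumerate ignoring the index
theorem pvFlatMap_enumerate {α β : Type} (l : List α) (s : Int) (g : α → List β) :
    (PySem.List.enumerate l s).flatMap (fun e => g e.2) = l.flatMap g := by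
  induction l generalizing s with
  | nil => rfl
  | cons x xs ih => simp [PySem.List.enumerate_cons, ih]

-- B's neighbour list is the enumeration filtered to the two neighbour houses
theorem pvNbr (P : List ((String × String) × Int)) (h1 : Int) :
    PySem.List.sorted
        ((pvBH (PySem.List.enumerate (P.map pvM))).getD (h1 + 1) [] ++
         (pvBH (PySem.List.enumerate (P.map pvM))).getD (h1 - 1) []) (fun e => e.1) false
      = (PySem.List.enumerate (P.map pvM)).filter
          (fun e => e.2.2.2 == h1 + 1 || e.2.2.2 == h1 - 1) := by
  rw [pvBH_getD, pvBH_getD]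
  exact pvSortedFilter _ _ _
    (by intro x hx; simp only [beq_iff_eq] at hx; simp only [beq_eq_false_iff_ne]; omega)
    (PySem.List.pairwise_lt_enumerate _ _)

-- pointwise agreement of the per-pair generators, on and off the neighbour houses
theorem pvLR_pointwise (p1 p2 : (String × String) × Int) :
    (if (p2.2 == p1.2 + 1 || p2.2 == p1.2 - 1) then pvGBLR (pvM p1) (pvM p2) else [])
      = pvGALR p1 p2 := by
  unfold pvGBLR pvGALR pvM
  by_cases hf : p1.1.1 == p2.1.1
  · simp [bne, hf]
  · by_cases ha : p2.2 = p1.2 + 1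
    · have hb : ¬ p2.2 = p1.2 - 1 := by omega
      have hne : ¬ (p1.2 + 1 = p1.2 - 1) := by omega
      simp [bne, hf, ha, hne]
    · by_cases hb : p2.2 = p1.2 - 1
      · have hne : ¬ (p1.2 - 1 = p1.2 + 1) := by omega
        simp [bne, hf, hb, hne]
      · simp [hf, ha, hb]

theorem pvS_pointwise (p1 p2 : (String × String) × Int) :
    (if (p2.2 == p1.2 + 1 || p2.2 == p1.2 - 1) then pvGBS (pvM p1) (pvM p2) else [])
      = pvGAS p1 p2 := by
  unfold pvGBS pvGAS pvM
  have habs : ((p1.2 - p2.2).natAbs == 1) = (p2.2 == p1.2 + 1 || p2.2 == p1.2 - 1) := by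
    rw [Bool.eq_iff_iff]; simp only [beq_iff_eq, Bool.or_eq_true]; omega
  by_cases hle : p2.1.1 ≤ p1.1.1
  · simp [hle, not_lt.mpr hle]
  · simp only [hle, Std.not_le.mp hle, if_pos, ← habs]
    split_ifs <;> simp_all

-- B's per-item neighbour scan equals A's per-item full scan (Left_Of/Right_Of)
theorem pvLR (P : List ((String × String) × Int)) (p1 : (String × String) × Int) :
    ((PySem.List.enumerate (P.map pvM)).filter
        (fun e => e.2.2.2 == p1.2 + 1 || e.2.2.2 == p1.2 - 1)).flatMap
        (fun e => pvGBLR (pvM p1) e.2)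
      = P.flatMap (pvGALR p1) := by
  rw [pvFlatMap_filter]
  refine (pvFlatMap_enumerate (P.map pvM) 0
      (fun x => if (x.2.2 == p1.2 + 1 || x.2.2 == p1.2 - 1) then pvGBLR (pvM p1) x else [])).trans ?_
  rw [List.flatMap_map]
  exact List.flatMap_congr (fun p2 _ => pvLR_pointwise p1 p2)

-- B's per-item neighbour scan equals A's per-item full scan (Side_By_Side)
theorem pvS (P : List ((String × String) × Int)) (p1 : (String × String) × Int) :
    ((PySem.List.enumerate (P.map pvM)).filter
        (fun e => e.2.2.2 == p1.2 + 1 || e.2.2.2 == p1.2 - 1)).flatMap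
        (fun e => pvGBS (pvM p1) e.2)
      = P.flatMap (pvGAS p1) := by
  rw [pvFlatMap_filter]
  refine (pvFlatMap_enumerate (P.map pvM) 0
      (fun x => if (x.2.2 == p1.2 + 1 || x.2.2 == p1.2 - 1) then pvGBS (pvM p1) x else [])).trans ?_
  rw [List.flatMap_map]
  exact List.flatMap_congr (fun p2 _ => pvS_pointwise p1 p2)

-- A's inner loops in flatMap form
theorem pvInnerLR (P : List ((String × String) × Int)) (p1 : (String × String) × Int)
    (acc : List (List String)) :
    P.foldl (fun acc p2 =>
        if p1.1.1 == p2.1.1 then acc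
        else
          let acc := if p2.2 == p1.2 + 1 then acc ++ [["Left_Of", p1.1.1, p1.1.2, p2.1.1, p2.1.2]] else acc
          if p2.2 == p1.2 - 1 then acc ++ [["Right_Of", p1.1.1, p1.1.2, p2.1.1, p2.1.2]] else acc) acc
      = acc ++ P.flatMap (pvGALR p1) := by
  rw [show (fun (acc : List (List String)) (p2 : (String × String) × Int) =>
        if p1.1.1 == p2.1.1 then acc
        else
          let acc := if p2.2 == p1.2 + 1 then acc ++ [["Left_Of", p1.1.1, p1.1.2, p2.1.1, p2.1.2]] else acc
          if p2.2 == p1.2 - 1 then acc ++ [["Right_Of", p1.1.1, p1.1.2, p2.1.1, p2.1.2]] else acc)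
      = (fun acc p2 => acc ++ pvGALR p1 p2) from funext fun acc => funext fun p2 => by
        unfold pvGALR; dsimp only; split_ifs <;> simp]
  exact PySem.List.foldl_append_eq_flatMap _ _ _

theorem pvInnerS (P : List ((String × String) × Int)) (p1 : (String × String) × Int)
    (acc : List (List String)) :
    P.foldl (fun acc p2 =>
        if p2.1.1 ≤ p1.1.1 then acc
        else if (p1.2 - p2.2).natAbs == 1 then acc ++ [["Side_By_Side", p1.1.1, p1.1.2, p2.1.1, p2.1.2]] else acc) acc
      = acc ++ P.flatMap (pvGAS p1) := by
  rw [show (fun (acc : List (List String)) (p2 : (String × String) × Int) =>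
        if p2.1.1 ≤ p1.1.1 then acc
        else if (p1.2 - p2.2).natAbs == 1 then acc ++ [["Side_By_Side", p1.1.1, p1.1.2, p2.1.1, p2.1.2]] else acc)
      = (fun acc p2 => acc ++ pvGAS p1 p2) from funext fun acc => funext fun p2 => by
        unfold pvGAS; split_ifs <;> simp]
  exact PySem.List.foldl_append_eq_flatMap _ _ _

-- B's inner loops in flatMap form
theorem pvInnerBLR (nb : List (Int × String × String × Int)) (t : String × String × Int)
    (acc : List (List String)) :
    nb.foldl (fun acc x =>
        if t.1 != x.2.1 then
          acc ++ [if x.2.2.2 == t.2.2 + 1 then ["Left_Of", t.1, t.2.1, x.2.1, x.2.2.1]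
                  else ["Right_Of", t.1, t.2.1, x.2.1, x.2.2.1]]
        else acc) acc
      = acc ++ nb.flatMap (fun x => pvGBLR t x.2) := by
  rw [show (fun (acc : List (List String)) (x : Int × String × String × Int) =>
        if t.1 != x.2.1 then
          acc ++ [if x.2.2.2 == t.2.2 + 1 then ["Left_Of", t.1, t.2.1, x.2.1, x.2.2.1]
                  else ["Right_Of", t.1, t.2.1, x.2.1, x.2.2.1]]
        else acc)
      = (fun acc x => acc ++ pvGBLR t x.2) from funext fun acc => funext fun x => by
        unfold pvGBLR; split_ifs <;> simp]
  exact PySem.List.foldl_append_eq_flatMap _ _ _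

theorem pvInnerBS (nb : List (Int × String × String × Int)) (t : String × String × Int)
    (acc : List (List String)) :
    nb.foldl (fun acc x =>
        if t.1 < x.2.1 then acc ++ [["Side_By_Side", t.1, t.2.1, x.2.1, x.2.2.1]] else acc) acc
      = acc ++ nb.flatMap (fun x => pvGBS t x.2) := by
  rw [show (fun (acc : List (List String)) (x : Int × String × String × Int) =>
        if t.1 < x.2.1 then acc ++ [["Side_By_Side", t.1, t.2.1, x.2.1, x.2.2.1]] else acc)
      = (fun acc x => acc ++ pvGBS t x.2) from funext fun acc => funext fun x => by
        unfold pvGBS; split_ifs <;> simp]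
  exact PySem.List.foldl_append_eq_flatMap _ _ _

-- the whole computation, abstracted over the shared pos.items list and n
theorem pvMaster (P : List ((String × String) × Int)) (n : Int) :
    (let clues : List (List String) := []
     let clues := P.foldl (fun acc p => acc ++ [["Found_At", p.1.1, p.1.2, PySem.Int.toStr p.2]]) clues
     let clues := P.foldl (fun acc p1 =>
        P.foldl (fun acc p2 =>
          if p1.1.1 == p2.1.1 then acc
          else
            let acc := if p2.2 == p1.2 + 1 then acc ++ [["Left_Of", p1.1.1, p1.1.2, p2.1.1, p2.1.2]] else acc
            if p2.2 == p1.2 - 1 then acc ++ [["Right_Of", p1.1.1, p1.1.2, p2.1.1, p2.1.2]] else acc) acc) clues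
     let clues := P.foldl (fun acc p1 =>
        P.foldl (fun acc p2 =>
          if p2.1.1 ≤ p1.1.1 then acc
          else if (p1.2 - p2.2).natAbs == 1 then acc ++ [["Side_By_Side", p1.1.1, p1.1.2, p2.1.1, p2.1.2]] else acc) acc) clues
     let clues := P.foldl (fun acc p =>
        (PySem.List.pyRange 1 (n + 1) 1).foldl (fun acc hw =>
          if hw != p.2 then acc ++ [["Not_At", p.1.1, p.1.2, PySem.Int.toStr hw]] else acc) acc) clues
     clues)
    =
    (let items : List (Int × String × String × Int) :=
        (PySem.List.enumerate P).map (fun e => (e.1, e.2.1.1, e.2.1.2, e.2.2))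
     let byHouse := items.foldl (fun d e => d.modify e.2.2.2 [] (· ++ [e])) PySem.Dict.empty
     let neighbours : Int → List (Int × String × String × Int) := fun h =>
        PySem.List.sorted (byHouse.getD (h + 1) [] ++ byHouse.getD (h - 1) []) (fun e => e.1) false
     let clues : List (List String) :=
        items.map (fun t => ["Found_At", t.2.1, t.2.2.1, PySem.Int.toStr t.2.2.2])
     let clues := items.foldl (fun acc t =>
        (neighbours t.2.2.2).foldl (fun acc x =>
          if t.2.1 != x.2.1 then
            acc ++ [if x.2.2.2 == t.2.2.2 + 1 then ["Left_Of", t.2.1, t.2.2.1, x.2.1, x.2.2.1]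
                    else ["Right_Of", t.2.1, t.2.2.1, x.2.1, x.2.2.1]]
          else acc) acc) clues
     let clues := items.foldl (fun acc t =>
        (neighbours t.2.2.2).foldl (fun acc x =>
          if t.2.1 < x.2.1 then acc ++ [["Side_By_Side", t.2.1, t.2.2.1, x.2.1, x.2.2.1]] else acc) acc) clues
     let clues := clues ++ items.flatMap (fun t =>
        ((PySem.List.pyRange 1 (n + 1) 1).filter (fun hw => hw != t.2.2.2)).map
          (fun hw => ["Not_At", t.2.1, t.2.2.1, PySem.Int.toStr hw]))
     clues)
    := by
  dsimp only
  rw [pvEnumMap P 0]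
  -- A side: inner loops to flatMap
  rw [show (fun (acc : List (List String)) (p1 : (String × String) × Int) =>
        P.foldl (fun acc p2 =>
          if p1.1.1 == p2.1.1 then acc
          else
            let acc := if p2.2 == p1.2 + 1 then acc ++ [["Left_Of", p1.1.1, p1.1.2, p2.1.1, p2.1.2]] else acc
            if p2.2 == p1.2 - 1 then acc ++ [["Right_Of", p1.1.1, p1.1.2, p2.1.1, p2.1.2]] else acc) acc)
      = fun acc p1 => acc ++ P.flatMap (pvGALR p1) from
        funext fun acc => funext fun p1 => pvInnerLR P p1 acc]
  rw [show (fun (acc : List (List String)) (p1 : (String × String) × Int) =>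
        P.foldl (fun acc p2 =>
          if p2.1.1 ≤ p1.1.1 then acc
          else if (p1.2 - p2.2).natAbs == 1 then acc ++ [["Side_By_Side", p1.1.1, p1.1.2, p2.1.1, p2.1.2]] else acc) acc)
      = fun acc p1 => acc ++ P.flatMap (pvGAS p1) from
        funext fun acc => funext fun p1 => pvInnerS P p1 acc]
  rw [show (fun (acc : List (List String)) (p : (String × String) × Int) =>
        (PySem.List.pyRange 1 (n + 1) 1).foldl (fun acc hw =>
          if hw != p.2 then acc ++ [["Not_At", p.1.1, p.1.2, PySem.Int.toStr hw]] else acc) acc)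
      = fun acc p => acc ++ ((PySem.List.pyRange 1 (n + 1) 1).filter (fun hw => hw != p.2)).map
          (fun hw => ["Not_At", p.1.1, p.1.2, PySem.Int.toStr hw]) from
        funext fun acc => funext fun p => PySem.List.foldl_append_if _ _ _ _]
  -- B side: inner loops to flatMap (with the neighbour list rewritten to a filter)
  rw [show (fun (acc : List (List String)) (t : Int × String × String × Int) =>
        (PySem.List.sorted
            ((List.foldl (fun d (e : Int × String × String × Int) => d.modify e.2.2.2 [] (· ++ [e])) PySem.Dict.empty (PySem.List.enumerate (P.map pvM))).getD (t.2.2.2 + 1) [] ++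
             (List.foldl (fun d (e : Int × String × String × Int) => d.modify e.2.2.2 [] (· ++ [e])) PySem.Dict.empty (PySem.List.enumerate (P.map pvM))).getD (t.2.2.2 - 1) []) (fun e => e.1) false).foldl
          (fun acc x =>
            if t.2.1 != x.2.1 then
              acc ++ [if x.2.2.2 == t.2.2.2 + 1 then ["Left_Of", t.2.1, t.2.2.1, x.2.1, x.2.2.1]
                      else ["Right_Of", t.2.1, t.2.2.1, x.2.1, x.2.2.1]]
            else acc) acc)
      = fun acc t => acc ++ ((PySem.List.enumerate (P.map pvM)).filter
            (fun e => e.2.2.2 == t.2.2.2 + 1 || e.2.2.2 == t.2.2.2 - 1)).flatMap (fun x => pvGBLR t.2 x.2) from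
        funext fun acc => funext fun t => by
          rw [show (List.foldl (fun d (e : Int × String × String × Int) => d.modify e.2.2.2 [] (· ++ [e])) PySem.Dict.empty (PySem.List.enumerate (P.map pvM))) = pvBH (PySem.List.enumerate (P.map pvM)) from rfl,
            pvNbr P t.2.2.2, pvInnerBLR]]
  rw [show (fun (acc : List (List String)) (t : Int × String × String × Int) =>
        (PySem.List.sorted
            ((List.foldl (fun d (e : Int × String × String × Int) => d.modify e.2.2.2 [] (· ++ [e])) PySem.Dict.empty (PySem.List.enumerate (P.map pvM))).getD (t.2.2.2 + 1) [] ++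
             (List.foldl (fun d (e : Int × String × String × Int) => d.modify e.2.2.2 [] (· ++ [e])) PySem.Dict.empty (PySem.List.enumerate (P.map pvM))).getD (t.2.2.2 - 1) []) (fun e => e.1) false).foldl
          (fun acc x =>
            if t.2.1 < x.2.1 then acc ++ [["Side_By_Side", t.2.1, t.2.2.1, x.2.1, x.2.2.1]] else acc) acc)
      = fun acc t => acc ++ ((PySem.List.enumerate (P.map pvM)).filter
            (fun e => e.2.2.2 == t.2.2.2 + 1 || e.2.2.2 == t.2.2.2 - 1)).flatMap (fun x => pvGBS t.2 x.2) from
        funext fun acc => funext fun t => by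
          rw [show (List.foldl (fun d (e : Int × String × String × Int) => d.modify e.2.2.2 [] (· ++ [e])) PySem.Dict.empty (PySem.List.enumerate (P.map pvM))) = pvBH (PySem.List.enumerate (P.map pvM)) from rfl,
            pvNbr P t.2.2.2, pvInnerBS]]
  rw [PySem.List.foldl_append_singleton_eq_map, PySem.List.foldl_append_eq_flatMap,
    PySem.List.foldl_append_eq_flatMap, PySem.List.foldl_append_eq_flatMap,
    PySem.List.foldl_append_eq_flatMap, PySem.List.foldl_append_eq_flatMap]
  have e1 : P.map (fun p => ["Found_At", p.1.1, p.1.2, PySem.Int.toStr p.2])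
      = (PySem.List.enumerate (P.map pvM)).map (fun t => ["Found_At", t.2.1, t.2.2.1, PySem.Int.toStr t.2.2.2]) := by
    rw [show (fun (t : Int × String × String × Int) => ["Found_At", t.2.1, t.2.2.1, PySem.Int.toStr t.2.2.2])
        = (fun (m : String × String × Int) => ["Found_At", m.1, m.2.1, PySem.Int.toStr m.2.2]) ∘ (fun t => t.2) from rfl,
      ← List.map_map, PySem.List.map_snd_enumerate, List.map_map]
    rfl
  have e2 : P.flatMap (fun p1 => P.flatMap (pvGALR p1))
      = (PySem.List.enumerate (P.map pvM)).flatMap (fun t =>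
          ((PySem.List.enumerate (P.map pvM)).filter
            (fun e => e.2.2.2 == t.2.2.2 + 1 || e.2.2.2 == t.2.2.2 - 1)).flatMap (fun x => pvGBLR t.2 x.2)) := by
    refine Eq.trans ?_ (pvFlatMap_enumerate (P.map pvM) 0 (fun m =>
      ((PySem.List.enumerate (P.map pvM)).filter
        (fun e => e.2.2.2 == m.2.2 + 1 || e.2.2.2 == m.2.2 - 1)).flatMap (fun x => pvGBLR m x.2))).symm
    rw [List.flatMap_map]
    exact List.flatMap_congr fun p1 _ => (pvLR P p1).symm
  have e3 : P.flatMap (fun p1 => P.flatMap (pvGAS p1))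
      = (PySem.List.enumerate (P.map pvM)).flatMap (fun t =>
          ((PySem.List.enumerate (P.map pvM)).filter
            (fun e => e.2.2.2 == t.2.2.2 + 1 || e.2.2.2 == t.2.2.2 - 1)).flatMap (fun x => pvGBS t.2 x.2)) := by
    refine Eq.trans ?_ (pvFlatMap_enumerate (P.map pvM) 0 (fun m =>
      ((PySem.List.enumerate (P.map pvM)).filter
        (fun e => e.2.2.2 == m.2.2 + 1 || e.2.2.2 == m.2.2 - 1)).flatMap (fun x => pvGBS m x.2))).symm
    rw [List.flatMap_map]
    exact List.flatMap_congr fun p1 _ => (pvS P p1).symm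
  have e4 : P.flatMap (fun p => ((PySem.List.pyRange 1 (n + 1) 1).filter (fun hw => hw != p.2)).map
        (fun hw => ["Not_At", p.1.1, p.1.2, PySem.Int.toStr hw]))
      = (PySem.List.enumerate (P.map pvM)).flatMap (fun t => ((PySem.List.pyRange 1 (n + 1) 1).filter (fun hw => hw != t.2.2.2)).map
        (fun hw => ["Not_At", t.2.1, t.2.2.1, PySem.Int.toStr hw])) := by
    refine Eq.trans ?_ (pvFlatMap_enumerate (P.map pvM) 0 (fun m =>
      ((PySem.List.pyRange 1 (n + 1) 1).filter (fun hw => hw != m.2.2)).map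
        (fun hw => ["Not_At", m.1, m.2.1, PySem.Int.toStr hw]))).symm
    rw [List.flatMap_map]; rfl
  rw [List.nil_append, e1, e2, e3, e4]

-- ===== VERDICT (by name: the statement is the Claim_ definition above) =====
theorem enumerate_clues_py_spec : Claim_equal_enumerate_clues_py := by
  intro solution features _
  show enumerate_clues_py solution features = enumerate_clues_py_alt solution features
  exact pvMaster
    ((PySem.Dict.ofList solution).items.foldl (fun d hp =>
      (PySem.Dict.ofList hp.2).items.foldl (fun d fv => d.insert fv hp.1) d) PySem.Dict.empty).items
    ((PySem.Dict.ofList solution).size : Int)
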